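-- pv_equiv track=rewrite | github.com/elonzhangyl/leetcode | 9. greedy/3.py | iscolatingList
-- ===== SOURCE A (Python) =====
-- def iscolatingList(lst: list) -> list:
--     count = 1
--     pre_d = 0
--
--     for i in range(len(lst) - 1):
--         cur_d = lst[i + 1] - lst[i]
--         if cur_d * pre_d <= 0 and cur_d != 0:
--             count += 1
--             pre_d = cur_d
--     return count
-- ===== SOURCE B (Python) =====
-- def iscolatingList(lst: list) -> list:
--     # Two-phase: materialize the +1/-1 signs of the nonzero consecutive
--     # differences, then count maximal same-sign runs; answer is 1 + runs.
--     signs = [1 if b > a else -1 for a, b in zip(lst, lst[1:]) if a != b]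
--     runs = min(len(signs), 1) + sum(1 for a, b in zip(signs, signs[1:]) if a != b)
--     return 1 + runs
-- ===== Notes on version B (the rewrite author's own statement) =====
-- stated objective: alternative
-- what changed: Replaces A's single stateful pass (count + remembered previous difference) by a two-phase pipeline: materialize the +1/-1 signs of the nonzero consecutive differences, then count maximal same-sign runs by comparing adjacent signs, returning 1 + runs.
import Mathlib
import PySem

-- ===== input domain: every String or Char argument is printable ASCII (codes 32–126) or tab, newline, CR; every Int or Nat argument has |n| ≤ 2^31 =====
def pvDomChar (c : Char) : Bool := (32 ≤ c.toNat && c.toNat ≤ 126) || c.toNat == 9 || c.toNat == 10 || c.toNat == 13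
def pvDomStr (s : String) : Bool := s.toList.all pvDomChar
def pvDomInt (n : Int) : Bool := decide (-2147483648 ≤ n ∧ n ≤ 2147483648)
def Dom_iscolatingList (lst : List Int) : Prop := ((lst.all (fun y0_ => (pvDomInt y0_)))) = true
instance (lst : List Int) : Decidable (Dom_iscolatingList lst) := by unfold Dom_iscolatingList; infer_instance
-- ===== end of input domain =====

-- B re-structures A's stateful zigzag count as "signs of nonzero diffs, then count runs"; return value only, no mutation.

-- ===== PORT A =====
-- loop over i in range(len(lst)-1) with state (count, pre_d); indices i, i+1 are
-- always in range, so pyGetD with default 0 is exact here.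
def iscolatingList (lst : List Int) : Int :=
  (((PySem.List.pyRange 0 (PySem.List.len lst - 1) 1).foldl
    (fun (st : Int × Int) i =>
      let cur_d := PySem.List.pyGetD lst (i + 1) 0 - PySem.List.pyGetD lst i 0
      if cur_d * st.2 ≤ 0 ∧ cur_d ≠ 0 then (st.1 + 1, cur_d) else st)
    (1, 0)) : Int × Int).1

-- ===== PORT B =====
def iscolatingList_alt (lst : List Int) : Int :=
  let signs : List Int :=
    (lst.zip (PySem.List.slice lst (some 1) none)).filterMap
      (fun ab => if ab.1 ≠ ab.2 then some (if ab.2 > ab.1 then (1 : Int) else -1) else none)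
  let runs : Int :=
    min (PySem.List.len signs) 1 +
      (signs.zip (PySem.List.slice signs (some 1) none)).foldl
        (fun acc ab => if ab.1 ≠ ab.2 then acc + 1 else acc) 0
  1 + runs

-- ===== PRECONDITION & SPEC =====
def Spec_iscolatingList (lst : List Int) (out : Int) : Prop := out = iscolatingList_alt lst
instance (lst : List Int) (out : Int) : Decidable (Spec_iscolatingList lst out) := by unfold Spec_iscolatingList; infer_instance

-- ===== CLAIM (what is proved, stated in full; the proofs are below) =====
def Claim_equal_iscolatingList : Prop := ∀ (lst : List Int), Dom_iscolatingList lst → Spec_iscolatingList lst (iscolatingList lst)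

-- ===== LEMMAS AND PROOFS =====

/-- sign of a nonzero difference, as B computes it -/
def pvSgn (d : Int) : Int := if d > 0 then 1 else -1

/-- run count of a sign list, parametrised by the optional previous sign -/
def pvRuns : Option Int → List Int → Int
  | _, [] => 0
  | none, s :: t => 1 + pvRuns (some s) t
  | some q, s :: t => (if s ≠ q then 1 else 0) + pvRuns (some s) t

def pvSigns (ds : List Int) : List Int := (ds.filter (fun d => d ≠ 0)).map pvSgn

def pvOptSgn (p : Int) : Option Int := if p = 0 then none else some (pvSgn p)

theorem pvSgn_eq_of_pos (d p : Int) (h : 0 < d * p) : pvSgn d = pvSgn p := by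
  unfold pvSgn
  rcases mul_pos_iff.mp h with ⟨h1, h2⟩ | ⟨h1, h2⟩ <;> simp [h1, h2] <;> omega

theorem pvSgn_ne_of_nonpos (d p : Int) (hd : d ≠ 0) (hp : p ≠ 0) (h : d * p ≤ 0) :
    pvSgn d ≠ pvSgn p := by
  unfold pvSgn
  rcases mul_nonpos_iff.mp h with ⟨h1, h2⟩ | ⟨h1, h2⟩ <;> simp <;> omega

/-- core invariant: A's fold over the diffs computes the run count of the signs -/
theorem pvAfold (ds : List Int) : ∀ c p : Int,
    (ds.foldl (fun (st : Int × Int) d =>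
        if d * st.2 ≤ 0 ∧ d ≠ 0 then (st.1 + 1, d) else st) (c, p)).1
      = c + pvRuns (pvOptSgn p) (pvSigns ds) := by
  induction ds with
  | nil => intro c p; simp [pvSigns, pvRuns]
  | cons d t ih =>
    intro c p
    by_cases hd : d = 0
    · simp [hd, pvSigns, ih c p]
    · by_cases hp : p = 0
      · subst hp
        simp only [List.foldl_cons, mul_zero, if_pos (And.intro le_rfl hd)]
        rw [ih]
        simp [pvSigns, hd, pvOptSgn, pvRuns]
        ring
      · by_cases hc : d * p ≤ 0
        · have hne : pvSgn d ≠ pvSgn p := pvSgn_ne_of_nonpos d p hd hp hc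
          simp only [List.foldl_cons, if_pos (And.intro hc hd)]
          rw [ih]
          simp [pvSigns, hd, pvOptSgn, pvRuns, hp, hne]
          ring
        · have heq : pvSgn d = pvSgn p := pvSgn_eq_of_pos d p (by omega)
          rw [List.foldl_cons,
            if_neg (show ¬(d * p ≤ 0 ∧ d ≠ 0) from fun hand => hc hand.1), ih]
          simp [pvSigns, hd, pvOptSgn, pvRuns, hp, heq]

/-- A's index loop equals the fold over adjacent pairs -/
theorem pvA_pairs (lst : List Int) :
    iscolatingList lst
      = (((lst.zip lst.tail).foldl (fun (st : Int × Int) ab =>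
          let d := ab.2 - ab.1
          if d * st.2 ≤ 0 ∧ d ≠ 0 then (st.1 + 1, d) else st) (1, 0)) : Int × Int).1 := by
  unfold iscolatingList
  congr 1
  cases lst with
  | nil => simp
  | cons x xs =>
    have hlen : ((x :: xs).zip (x :: xs).tail).length = xs.length := by
      simp [List.length_zip]
    have hbound : PySem.List.len (x :: xs) - 1 = ((((x :: xs).zip (x :: xs).tail)).length : Int) := by
      simp
    rw [hbound]
    rw [PySem.List.foldl_congr_mem (g := fun (st : Int × Int) i =>
        (fun (st : Int × Int) (ab : Int × Int) =>
          let d := ab.2 - ab.1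
          if d * st.2 ≤ 0 ∧ d ≠ 0 then (st.1 + 1, d) else st) st
          (PySem.List.pyGetD ((x :: xs).zip (x :: xs).tail) i ((0 : Int), (0 : Int))))
      (h := ?_)]
    · exact PySem.List.foldl_pyRange_zero_pyGetD' ((x :: xs).zip (x :: xs).tail)
        ((0 : Int), (0 : Int))
        (fun (st : Int × Int) (ab : Int × Int) =>
          let d := ab.2 - ab.1
          if d * st.2 ≤ 0 ∧ d ≠ 0 then (st.1 + 1, d) else st) (1, 0)
    · intro acc i hi
      rw [PySem.List.mem_pyRange_one] at hi
      have hik : i < (xs.length : Int) := by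
        have := hi.2; rw [hlen] at this; exact this
      obtain ⟨k, rfl⟩ : ∃ k : Nat, i = (k : Int) := ⟨i.toNat, (Int.toNat_of_nonneg hi.1).symm⟩
      have hk : k < xs.length := by exact_mod_cast hik
      have h1 : PySem.List.pyGetD ((x :: xs).zip (x :: xs).tail) (k : Int) ((0 : Int), (0 : Int))
          = ((x :: xs)[k]'(by simp; omega), xs[k]'hk) := by
        rw [PySem.List.pyGetD_natCast,
          List.getD_eq_getElem _ _ (by simpa [hlen] using hk)]
        simp [List.getElem_zip]
      have h2 : PySem.List.pyGetD (x :: xs) ((k : Int) + 1) 0 = xs[k]'hk := by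
        have hcast : ((k : Int) + 1) = ((k + 1 : Nat) : Int) := by push_cast; ring
        rw [hcast, PySem.List.pyGetD_natCast,
          List.getD_eq_getElem _ _ (by simp; omega)]
        simp
      have h3 : PySem.List.pyGetD (x :: xs) (k : Int) 0 = (x :: xs)[k]'(by simp; omega) := by
        rw [PySem.List.pyGetD_natCast, List.getD_eq_getElem _ _ (by simp; omega)]
      simp only [h1, h2, h3]

/-- B's filterMap over pairs is the sign list of the diffs -/
theorem pvSigns_eq (ps : List (Int × Int)) :
    ps.filterMap (fun ab => if ab.1 ≠ ab.2 then some (if ab.2 > ab.1 then (1 : Int) else -1) else none)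
      = pvSigns (ps.map (fun ab => ab.2 - ab.1)) := by
  induction ps with
  | nil => simp [pvSigns]
  | cons ab t ih =>
    by_cases h : ab.1 = ab.2
    · have hz : ab.2 - ab.1 = 0 := by omega
      simp only [List.filterMap_cons, List.map_cons,
        if_neg (show ¬ab.1 ≠ ab.2 from not_not_intro h)]
      rw [ih]
      simp [pvSigns, hz]
    · have hne : ab.2 - ab.1 ≠ 0 := sub_ne_zero.mpr (Ne.symm h)
      simp only [List.filterMap_cons, List.map_cons, if_pos (show ab.1 ≠ ab.2 from h)]
      rw [ih]
      simp [pvSigns, hne, pvSgn]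

/-- B's adjacent-pair run counter with explicit previous sign -/
theorem pvBadj (t : List Int) : ∀ (q acc : Int),
    ((q :: t).zip t).foldl (fun acc ab => if ab.1 ≠ ab.2 then acc + 1 else acc) acc
      = acc + pvRuns (some q) t := by
  induction t with
  | nil => intro q acc; simp [pvRuns]
  | cons s t' ih =>
    intro q acc
    simp only [List.zip_cons_cons, List.foldl_cons, pvRuns]
    rw [ih]
    by_cases h : q = s <;> simp [h] <;> omega

theorem pvB_runs (s : List Int) :
    min ((s.length : Int)) 1 +
      (s.zip s.tail).foldl (fun acc ab => if ab.1 ≠ ab.2 then acc + 1 else acc) 0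
      = pvRuns none s := by
  cases s with
  | nil => simp [pvRuns]
  | cons x t =>
    simp only [List.tail_cons, pvRuns]
    rw [pvBadj t x 0]
    have : min (((x :: t).length : Int)) 1 = 1 := by simp
    rw [this]; omega

-- ===== VERDICT (by name: the statement is the Claim_ definition above) =====
theorem iscolatingList_spec : Claim_equal_iscolatingList := by
  intro lst _
  unfold Spec_iscolatingList iscolatingList_alt
  rw [pvA_pairs]
  have hdiff : (lst.zip lst.tail).foldl (fun (st : Int × Int) ab =>
      let d := ab.2 - ab.1
      if d * st.2 ≤ 0 ∧ d ≠ 0 then (st.1 + 1, d) else st) (1, 0)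
      = ((lst.zip lst.tail).map (fun ab => ab.2 - ab.1)).foldl (fun (st : Int × Int) d =>
          if d * st.2 ≤ 0 ∧ d ≠ 0 then (st.1 + 1, d) else st) (1, 0) := by
    rw [List.foldl_map]
  rw [hdiff, pvAfold]
  simp only [PySem.List.slice_from_one, pvSigns_eq, PySem.List.len_eq]
  rw [pvB_runs]
  all_goals simp [pvOptSgn]
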